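-- pv_equiv track=rewrite | github.com/ZhaoYuLeo/cs61a | mt/61a-fa17-mt1/digital.py | collapse_solu
-- ===== SOURCE A (Python) =====
-- def collapse_solu(n):
--     """
--     >>> collapse_solu(1234)
--     1234
--     >>> collapse_solu(12234441)
--     12341
--     >>> collapse_solu(0)
--     0
--     >>> collapse_solu(3)
--     3
--     >>> collapse_solu(11200000013333)
--     12013
--     """
--     left, last = n // 10, n % 10
--
--     if left == 0:
--         return last
--     elif last == left % 10:
--         return collapse_solu(left)
--     else:
--         return collapse_solu(left) * 10 + last
-- ===== SOURCE B (Python) =====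
-- def collapse_solu(n):
--     digits = []
--     while True:
--         left, last = n // 10, n % 10
--         if left == 0:
--             digits.append(last)
--             break
--         elif last == left % 10:
--             pass
--         else:
--             digits.append(last)
--         n = left
--     result = 0
--     for d in reversed(digits):
--         result = result * 10 + d
--     return result
-- ===== Notes on version B (the rewrite author's own statement) =====
-- stated objective: alternative
-- what changed: Replaces A's recursion with an explicit iterative loop that collects the kept digits least-significant-first in a list and then rebuilds the integer by folding the list in reverse.
import Mathlib
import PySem

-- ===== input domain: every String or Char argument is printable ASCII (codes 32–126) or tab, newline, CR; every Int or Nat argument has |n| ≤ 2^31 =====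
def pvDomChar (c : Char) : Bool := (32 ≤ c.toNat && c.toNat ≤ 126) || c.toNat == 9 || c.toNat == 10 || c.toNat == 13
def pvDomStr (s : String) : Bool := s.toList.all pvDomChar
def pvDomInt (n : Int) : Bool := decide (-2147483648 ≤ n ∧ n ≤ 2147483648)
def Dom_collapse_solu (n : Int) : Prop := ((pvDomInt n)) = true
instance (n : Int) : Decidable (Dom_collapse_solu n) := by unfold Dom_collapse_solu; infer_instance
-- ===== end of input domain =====

-- B replaces A's recursion by an explicit loop that collects kept digits LSB-first and rebuilds the integer in reverse (objective: alternative decomposition, same cost).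


-- termination helper (cited by both ports' decreasing_by)
theorem pv_fdiv_toNat_lt {n : Int} (h0 : ¬ n < 0) (hne : ¬ PySem.Int.floordiv n 10 = 0) :
    (PySem.Int.floordiv n 10).toNat < n.toNat := by
  have hpos : 0 < (10:Int) := by omega
  rw [PySem.Int.floordiv_eq_ediv_of_pos hpos] at hne ⊢
  omega

-- ===== PORT A =====
-- literal port of A's recursion; the 'n < 0' guard makes it total: Python A
-- recurses forever (RecursionError) there, and Pre_ excludes those inputs.
def collapse_solu (n : Int) : Int :=
  if n < 0 then 0
  else
    let left := PySem.Int.floordiv n 10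
    let last := PySem.Int.mod n 10
    if left = 0 then last
    else if last = PySem.Int.mod left 10 then collapse_solu left
    else collapse_solu left * 10 + last
termination_by n.toNat
decreasing_by all_goals exact pv_fdiv_toNat_lt (by assumption) (by assumption)

-- ===== PORT B =====
-- the 'while True' loop: acc is the digits list built so far (LSB-first);
-- the 'n < 0' guard makes it total — Python B loops forever there, outside Pre_.
def collapse_loop (n : Int) (acc : List Int) : List Int :=
  if n < 0 then acc
  else
    let left := PySem.Int.floordiv n 10
    let last := PySem.Int.mod n 10
    if left = 0 then acc ++ [last]
    else if last = PySem.Int.mod left 10 then collapse_loop left acc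
    else collapse_loop left (acc ++ [last])
termination_by n.toNat
decreasing_by all_goals exact pv_fdiv_toNat_lt (by assumption) (by assumption)

def collapse_solu_alt (n : Int) : Int :=
  ((collapse_loop n []).reverse).foldl (fun result d => result * 10 + d) 0

-- ===== PRECONDITION & SPEC =====
-- Pre_ excludes n < 0: there Python A recurses without bound (RecursionError)
-- and Python B's loop never terminates; neither returns a value.
def Pre_collapse_solu (n : Int) : Prop := 0 ≤ n
instance (n : Int) : Decidable (Pre_collapse_solu n) := by unfold Pre_collapse_solu; infer_instance
def pvWitness_collapse_solu : Int := (12234441)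

def Spec_collapse_solu (n : Int) (out : Int) : Prop := out = collapse_solu_alt n
instance (n : Int) (out : Int) : Decidable (Spec_collapse_solu n out) := by unfold Spec_collapse_solu; infer_instance

-- ===== CLAIM (what is proved, stated in full; the proofs are below) =====
def Claim_equal_collapse_solu : Prop := ∀ (n : Int), Dom_collapse_solu n → Pre_collapse_solu n → Spec_collapse_solu n (collapse_solu n)

-- ===== LEMMAS AND PROOFS =====

-- the loop only appends: its result is acc followed by what it produces from []
theorem collapse_loop_acc : ∀ (k : Nat) (n : Int), n.toNat = k →
    ∀ (acc : List Int), collapse_loop n acc = acc ++ collapse_loop n [] := by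
  intro k
  induction k using Nat.strong_induction_on with
  | _ k ih =>
    intro n hk acc
    by_cases h : n < 0
    · rw [collapse_loop, collapse_loop]
      simp only [if_pos h, List.append_nil]
    · by_cases h1 : PySem.Int.floordiv n 10 = 0
      · rw [collapse_loop, collapse_loop]
        simp only [if_neg h, if_pos h1, List.nil_append]
      · have hlt : (PySem.Int.floordiv n 10).toNat < k := hk ▸ pv_fdiv_toNat_lt h h1
        by_cases h2 : PySem.Int.mod n 10 = PySem.Int.mod (PySem.Int.floordiv n 10) 10
        · rw [collapse_loop, collapse_loop]
          simp only [if_neg h, if_neg h1, if_pos h2]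
          exact ih _ hlt _ rfl acc
        · rw [collapse_loop, collapse_loop]
          simp only [if_neg h, if_neg h1, if_neg h2, List.nil_append]
          rw [ih _ hlt _ rfl (acc ++ [PySem.Int.mod n 10]), ih _ hlt _ rfl ([PySem.Int.mod n 10])]
          rw [List.append_assoc]

theorem collapse_main : ∀ (k : Nat) (n : Int), n.toNat = k →
    collapse_solu n = ((collapse_loop n []).reverse).foldl (fun result d => result * 10 + d) 0 := by
  intro k
  induction k using Nat.strong_induction_on with
  | _ k ih =>
    intro n hk
    by_cases h : n < 0
    · rw [collapse_solu, collapse_loop]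
      simp only [if_pos h, List.reverse_nil, List.foldl_nil]
    · by_cases h1 : PySem.Int.floordiv n 10 = 0
      · rw [collapse_solu, collapse_loop]
        simp only [if_neg h, if_pos h1, List.nil_append, List.reverse_singleton, List.foldl_cons,
          List.foldl_nil, zero_mul, zero_add]
      · have hlt : (PySem.Int.floordiv n 10).toNat < k := hk ▸ pv_fdiv_toNat_lt h h1
        by_cases h2 : PySem.Int.mod n 10 = PySem.Int.mod (PySem.Int.floordiv n 10) 10
        · rw [collapse_solu, collapse_loop]
          simp only [if_neg h, if_neg h1, if_pos h2]
          exact ih _ hlt _ rfl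
        · rw [collapse_solu, collapse_loop]
          simp only [if_neg h, if_neg h1, if_neg h2, List.nil_append]
          rw [collapse_loop_acc _ (PySem.Int.floordiv n 10) rfl ([PySem.Int.mod n 10])]
          rw [List.reverse_append, List.foldl_append]
          rw [ih _ hlt _ rfl]
          simp only [List.reverse_singleton, List.foldl_cons, List.foldl_nil]

-- ===== VERDICT (by name: the statement is the Claim_ definition above) =====
theorem collapse_solu_spec : Claim_equal_collapse_solu := by
  intro n _ _
  unfold Spec_collapse_solu collapse_solu_alt
  exact collapse_main n.toNat n rfl
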